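-- pv_equiv track=rewrite | github.com/xmaslo/log-signing-mpc | tests/common/endpoint_triggers.py | get_keygen_payloads
-- ===== SOURCE A (Python) =====
-- def get_keygen_payloads(n, is_docker):
--     payloads = []
--     for i in range(n):
--         payload = ""
--         for j in range(n):
--             if i != j:
--                 if is_docker:
--                     payload += f"la{j + 1}:300{j + 1},"
--                 else:
--                     payload += f"127.0.0.1:300{j + 1},"
--
--         payloads.append(payload[:-1])  # remove trailing ','
--
--     return payloads
-- ===== SOURCE B (Python) =====
-- def get_keygen_payloads(n, is_docker):
--     tokens = [f"la{j + 1}:300{j + 1}" if is_docker else f"127.0.0.1:300{j + 1}"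
--               for j in range(n)]
--     return [",".join(tokens[:i] + tokens[i + 1:]) for i in range(n)]
-- ===== Notes on version B (the rewrite author's own statement) =====
-- stated objective: simpler
-- what changed: B precomputes a single token table for all n peers and builds each node's line with a self-excluding slice join (tokens[:i]+tokens[i+1:]), eliminating A's nested i!=j conditional loop, the per-pair string accumulation and the trailing-comma [:-1] trim.
import Mathlib
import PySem

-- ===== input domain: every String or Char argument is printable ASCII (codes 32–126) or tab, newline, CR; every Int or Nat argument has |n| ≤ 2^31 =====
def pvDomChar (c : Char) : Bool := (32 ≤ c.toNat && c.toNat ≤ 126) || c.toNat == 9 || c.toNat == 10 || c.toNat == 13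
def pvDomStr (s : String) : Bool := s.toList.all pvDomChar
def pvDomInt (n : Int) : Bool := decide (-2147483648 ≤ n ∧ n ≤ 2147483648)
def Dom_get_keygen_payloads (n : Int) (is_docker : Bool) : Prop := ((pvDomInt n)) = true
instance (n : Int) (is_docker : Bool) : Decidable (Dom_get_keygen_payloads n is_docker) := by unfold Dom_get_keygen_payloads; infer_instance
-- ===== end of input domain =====

-- B precomputes one peer-token table and builds each line with a self-excluding join,
-- replacing A's nested conditional loop and trailing-comma trim (objective: simpler).

-- ===== PORT A =====
def get_keygen_payloads (n : Int) (is_docker : Bool) : List String :=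
  (PySem.List.pyRange 0 n 1).foldl (fun payloads i =>
    let payload :=
      (PySem.List.pyRange 0 n 1).foldl (fun payload j =>
        if i ≠ j then
          if is_docker then
            payload ++ ("la" ++ PySem.Int.toStr (j + 1) ++ ":300" ++ PySem.Int.toStr (j + 1) ++ ",")
          else
            payload ++ ("127.0.0.1:300" ++ PySem.Int.toStr (j + 1) ++ ",")
        else payload) ""
    payloads ++ [PySem.Str.slice payload none (some (-1))]) []

-- ===== PORT B =====
def get_keygen_payloads_alt (n : Int) (is_docker : Bool) : List String :=
  let tokens := (PySem.List.pyRange 0 n 1).map (fun j =>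
    if is_docker then "la" ++ PySem.Int.toStr (j + 1) ++ ":300" ++ PySem.Int.toStr (j + 1)
    else "127.0.0.1:300" ++ PySem.Int.toStr (j + 1))
  (PySem.List.pyRange 0 n 1).map (fun i =>
    PySem.Str.join "," (PySem.List.slice tokens none (some i) ++ PySem.List.slice tokens (some (i + 1)) none))

-- ===== PRECONDITION & SPEC =====
def Spec_get_keygen_payloads (n : Int) (is_docker : Bool) (out : List String) : Prop := out = get_keygen_payloads_alt n is_docker
instance (n : Int) (is_docker : Bool) (out : List String) : Decidable (Spec_get_keygen_payloads n is_docker out) := by unfold Spec_get_keygen_payloads; infer_instance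

-- ===== CLAIM (what is proved, stated in full; the proofs are below) =====
def Claim_equal_get_keygen_payloads : Prop := ∀ (n : Int) (is_docker : Bool), Dom_get_keygen_payloads n is_docker → Spec_get_keygen_payloads n is_docker (get_keygen_payloads n is_docker)

-- ===== LEMMAS AND PROOFS =====

def pvTok (d : Bool) (j : Int) : String :=
  if d then "la" ++ PySem.Int.toStr (j + 1) ++ ":300" ++ PySem.Int.toStr (j + 1)
  else "127.0.0.1:300" ++ PySem.Int.toStr (j + 1)

theorem pv_inner_toList (d : Bool) (i : Int) (L : List Int) (s : String) :
    (L.foldl (fun payload j =>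
        if i ≠ j then
          if d then
            payload ++ ("la" ++ PySem.Int.toStr (j + 1) ++ ":300" ++ PySem.Int.toStr (j + 1) ++ ",")
          else
            payload ++ ("127.0.0.1:300" ++ PySem.Int.toStr (j + 1) ++ ",")
        else payload) s).toList
      = s.toList ++ ((L.filter (fun j => j ≠ i)).map (fun j => (pvTok d j).toList ++ [','])).flatten := by
  induction L generalizing s with
  | nil => simp
  | cons a t ih =>
    rw [List.foldl_cons]
    by_cases ha : a = i
    · subst ha
      rw [if_neg fun h => h rfl, ih]
      simp
    · have hne : i ≠ a := fun h => ha h.symm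
      rw [if_pos hne, ih]
      cases d <;> simp [pvTok, ha]

theorem pv_dropLast_flatten (ls : List (List Char)) :
    ((ls.map (fun l => l ++ [','])).flatten).dropLast = List.intercalate [','] ls := by
  induction ls with
  | nil => simp [List.intercalate]
  | cons a t ih =>
    cases t with
    | nil => simp [List.intercalate]
    | cons b u =>
      rw [List.map_cons, List.flatten_cons, List.dropLast_append_of_ne_nil (by simp), ih]
      simp [List.intercalate, List.intersperse]

theorem pv_idxOf_range (m k : Nat) (h : k < m) : List.idxOf k (List.range m) = k := by
  induction m with
  | zero => omega
  | succ p ih =>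
    rw [List.range_succ]
    by_cases hk : k < p
    · rw [List.idxOf_append_of_mem (by simpa using hk)]; exact ih hk
    · have hkp : k = p := by omega
      subst hkp
      rw [List.idxOf_append_of_notMem (by simp)]
      simp

theorem pv_filter_range (m k : Nat) (h : k < m) :
    (List.range m).filter (fun x => x ≠ k) = (List.range m).take k ++ (List.range m).drop (k + 1) := by
  rw [← List.eraseIdx_eq_take_drop_succ,
    ← List.erase_eq_eraseIdx_of_idxOf (pv_idxOf_range m k h),
    List.Nodup.erase_eq_filter (List.nodup_range) k]
  apply List.filter_congr
  intro x _
  rcases eq_or_ne x k with hx | hx <;> simp [hx]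

theorem pv_filter_pyRange (n i : Int) (h0 : 0 ≤ i) (h1 : i < n) :
    (PySem.List.pyRange 0 n 1).filter (fun j => j ≠ i)
      = (PySem.List.pyRange 0 n 1).take i.toNat ++ (PySem.List.pyRange 0 n 1).drop (i + 1).toNat := by
  obtain ⟨m, rfl⟩ : ∃ m : Nat, n = (m : Int) := ⟨n.toNat, by omega⟩
  obtain ⟨k, rfl⟩ : ∃ k : Nat, i = (k : Int) := ⟨i.toNat, by omega⟩
  have hk : k < m := by exact_mod_cast h1
  rw [PySem.List.pyRange_zero_natCast, List.filter_map]
  have : ((fun j => decide (j ≠ (k : Int))) ∘ fun x : Nat => (x : Int)) = fun x : Nat => decide (x ≠ k) := by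
    funext x; simp
  rw [this, pv_filter_range m k hk, List.map_append, List.map_take, List.map_drop]
  norm_num

theorem get_keygen_payloads_eq (n : Int) (d : Bool) :
    get_keygen_payloads n d = get_keygen_payloads_alt n d := by
  unfold get_keygen_payloads get_keygen_payloads_alt
  rw [PySem.List.foldl_append_singleton_eq_map, List.nil_append]
  apply List.map_congr_left
  intro i hi
  obtain ⟨h0, h1⟩ := PySem.List.mem_pyRange_one.mp hi
  apply String.toList_inj.mp
  rw [PySem.Str.slice_to_neg_one, pv_inner_toList, PySem.Str.toList_join,
    PySem.List.slice_to _ h0, PySem.List.slice_from _ (by omega : (0:Int) ≤ i + 1),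
    pv_filter_pyRange n i h0 h1]
  have hmaps : ((PySem.List.pyRange 0 n 1).take i.toNat ++ (PySem.List.pyRange 0 n 1).drop (i + 1).toNat).map
      (fun j => ((pvTok d j).toList ++ [','])) = (((PySem.List.pyRange 0 n 1).take i.toNat ++ (PySem.List.pyRange 0 n 1).drop (i + 1).toNat).map
      (fun j => (pvTok d j).toList)).map (fun l => l ++ [',']) := by
    rw [List.map_map]; rfl
  have hnil : "".toList = ([] : List Char) := rfl
  rw [hmaps, hnil, List.nil_append, pv_dropLast_flatten]
  simp only [PySem.Chars.join]
  rw [← List.map_take, ← List.map_drop, ← List.map_append, List.map_map]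
  rfl

-- ===== VERDICT (by name: the statement is the Claim_ definition above) =====
theorem get_keygen_payloads_spec : Claim_equal_get_keygen_payloads := by
  intro n is_docker _
  unfold Spec_get_keygen_payloads
  exact (get_keygen_payloads_eq n is_docker).symm ▸ rfl
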